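-- pv_equiv track=rewrite | github.com/Siphlygon/XenoverseWikiScripts | locations.py | calculate_rarity_for_good_rod
-- ===== SOURCE A (Python) =====
-- def calculate_rarity_for_good_rod(indexes):
--     """
--     Calculate encounter percentages and thus rarity for good rod encounters based on index in the list of encounters.
--
--     Pokémon may appear at multiple indices, and the resultant encounter percentage is the sum. The percentage is decided
--     as follows:
--
--     Pokémon 1 - 60%
--     Pokémon 2 - 20%
--     Pokémon 3 - 20%
--
--     For this specific biome, common rarity is >=40%, uncommon rarity is <40%,
--
--     :param list[int] indexes: Indexes of the Pokémon's encounter data.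
--     :return string: Calculated rarity.
--     """
--     percentage = 0
--     for index in indexes:
--         if index in [1]:
--             percentage += 60
--         else:
--             percentage += 20
--
--     if percentage >= 40:
--         rarity = "Common"
--     else:
--         rarity = "Uncommon"
--
--     return rarity
-- ===== SOURCE B (Python) =====
-- def calculate_rarity_for_good_rod(indexes):
--     """Closed-form rewrite: each index contributes 20%, each occurrence of 1 an extra 40%."""
--     percentage = 20 * len(indexes) + 40 * indexes.count(1)
--     return "Common" if percentage >= 40 else "Uncommon"
-- ===== Notes on version B (the rewrite author's own statement) =====
-- stated objective: simpler
-- what changed: Replaced the per-element branch-and-accumulate loop by a closed-form arithmetic expression (20*len + 40*count(1)) followed by the same threshold test.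
import Mathlib
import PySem

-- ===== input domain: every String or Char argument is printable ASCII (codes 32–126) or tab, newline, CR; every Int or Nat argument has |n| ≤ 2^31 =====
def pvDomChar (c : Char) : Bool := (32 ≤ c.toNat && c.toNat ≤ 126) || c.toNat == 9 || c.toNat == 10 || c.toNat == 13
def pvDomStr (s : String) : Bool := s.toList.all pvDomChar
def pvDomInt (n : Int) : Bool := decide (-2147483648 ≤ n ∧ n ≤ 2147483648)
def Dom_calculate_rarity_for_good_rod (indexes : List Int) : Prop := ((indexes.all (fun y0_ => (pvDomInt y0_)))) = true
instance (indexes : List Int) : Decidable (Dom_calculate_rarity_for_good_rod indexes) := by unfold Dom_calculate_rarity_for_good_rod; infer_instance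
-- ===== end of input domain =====

-- B replaces A's accumulation loop by a closed-form percentage (20*len + 40*count(1)); objective: simpler.

-- ===== PORT A =====
def calculate_rarity_for_good_rod (indexes : List Int) : String :=
  let percentage : Int := indexes.foldl (fun acc index => if index ∈ ([1] : List Int) then acc + 60 else acc + 20) 0
  if percentage ≥ 40 then "Common" else "Uncommon"

-- ===== PORT B =====
def calculate_rarity_for_good_rod_alt (indexes : List Int) : String :=
  let percentage : Int := 20 * indexes.length + 40 * PySem.List.count indexes 1
  if percentage ≥ 40 then "Common" else "Uncommon"

-- ===== PRECONDITION & SPEC =====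
def Spec_calculate_rarity_for_good_rod (indexes : List Int) (out : String) : Prop := out = calculate_rarity_for_good_rod_alt indexes
instance (indexes : List Int) (out : String) : Decidable (Spec_calculate_rarity_for_good_rod indexes out) := by unfold Spec_calculate_rarity_for_good_rod; infer_instance

-- ===== CLAIM (what is proved, stated in full; the proofs are below) =====
def Claim_equal_calculate_rarity_for_good_rod : Prop := ∀ (indexes : List Int), Dom_calculate_rarity_for_good_rod indexes → Spec_calculate_rarity_for_good_rod indexes (calculate_rarity_for_good_rod indexes)

-- ===== LEMMAS AND PROOFS =====

theorem rod_fold_closed (indexes : List Int) (acc : Int) :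
    List.foldl (fun (acc index : Int) => if index ∈ ([1] : List Int) then acc + 60 else acc + 20) acc indexes
      = acc + 20 * indexes.length + 40 * (PySem.List.count indexes 1 : Int) := by
  induction indexes generalizing acc with
  | nil => simp [PySem.List.count]
  | cons x xs ih =>
    rw [List.foldl_cons, ih]
    simp only [PySem.List.count, List.count_cons, List.length_cons, List.mem_singleton]
    by_cases h : x = 1 <;> simp [h] <;> push_cast <;> ring

theorem rod_fold_closed0 (indexes : List Int) :
    List.foldl (fun (acc index : Int) => if index ∈ ([1] : List Int) then acc + 60 else acc + 20) 0 indexes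
      = 20 * indexes.length + 40 * (PySem.List.count indexes 1 : Int) := by
  rw [rod_fold_closed]; ring

-- ===== VERDICT (by name: the statement is the Claim_ definition above) =====
theorem calculate_rarity_for_good_rod_spec : Claim_equal_calculate_rarity_for_good_rod := by
  intro indexes _
  simp only [Spec_calculate_rarity_for_good_rod, calculate_rarity_for_good_rod,
    calculate_rarity_for_good_rod_alt]
  rw [rod_fold_closed0]
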